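-- pv_equiv track=rewrite | github.com/dfadeeff/LeetCode_Python | pythonProject/Curated_lists/Uber/LC2861_Alloys.py | maxNumberOfAlloys
-- ===== SOURCE A (Python) =====
-- from typing import List
--
-- def maxNumberOfAlloys(n: int, k: int, budget: int, composition: List[List[int]], stock: List[int],
--                       cost: List[int]) -> int:
--
--     def can_make(mid, machine):
--         total = 0
--         for j in range(n):
--             needed = composition[machine][j] * mid
--             shortage = max(0, needed - stock[j])
--             total += shortage * cost[j]
--             if total > budget:
--                 return False
--         return True
--
--     lo = 0
--     hi = max(stock) + budget   # ← fix
--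
--     while lo < hi:
--         mid = (lo + hi + 1) // 2
--         if any(can_make(mid, i) for i in range(k)):
--             lo = mid
--         else:
--             hi = mid - 1
--
--     return lo
-- ===== SOURCE B (Python) =====
-- from typing import List
--
-- def maxNumberOfAlloys(n: int, k: int, budget: int, composition: List[List[int]], stock: List[int],
--                       cost: List[int]) -> int:
--     # Bitwise doubling search per machine (no lo/hi binary search, no any()):
--     # grow a power-of-two step past the cap, then descend bit by bit, keeping
--     # the largest affordable count; fold the per-machine counts with max.
--     hi = max(stock) + budget
--
--     def fits(row, x):
--         # total cost of making x alloys on this machine stays within budget at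
--         # every prefix (full pass with a flag, no early return)
--         t, over = 0, False
--         for j in range(n):
--             t += max(0, row[j] * x - stock[j]) * cost[j]
--             over = over or t > budget
--         return not over
--
--     best = 0
--     for i in range(k):
--         row = composition[i]
--         step = 1
--         while step * 2 <= hi:
--             step *= 2
--         x = 0
--         while step > 0:
--             if x + step <= hi and fits(row, x + step):
--                 x += step
--             step //= 2
--         best = max(best, x)
--     return best
-- ===== Notes on version B (the rewrite author's own statement) =====
-- stated objective: alternative
-- what changed: Replaces the single global binary search (feasibility = any() over machines, cost loop with early return) by, per machine, a bitwise doubling-then-halving search over the same [0, max(stock)+budget] cap with a full-pass prefix-flag cost check, folding the per-machine counts with max.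
-- outside the precondition, e.g. on maxNumberOfAlloys(2, 3, -2, [[1, 1], [3, -3], [1, -2]], [6, 3], [-2, 0]): A returns 0, B returns 4; on maxNumberOfAlloys(0, 1, 3, [], [5], []): A returns 8, B raises IndexError; on maxNumberOfAlloys(2, 1, 0, [[5]], [1], [7]): A returns 0, B raises IndexError
import Mathlib
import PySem

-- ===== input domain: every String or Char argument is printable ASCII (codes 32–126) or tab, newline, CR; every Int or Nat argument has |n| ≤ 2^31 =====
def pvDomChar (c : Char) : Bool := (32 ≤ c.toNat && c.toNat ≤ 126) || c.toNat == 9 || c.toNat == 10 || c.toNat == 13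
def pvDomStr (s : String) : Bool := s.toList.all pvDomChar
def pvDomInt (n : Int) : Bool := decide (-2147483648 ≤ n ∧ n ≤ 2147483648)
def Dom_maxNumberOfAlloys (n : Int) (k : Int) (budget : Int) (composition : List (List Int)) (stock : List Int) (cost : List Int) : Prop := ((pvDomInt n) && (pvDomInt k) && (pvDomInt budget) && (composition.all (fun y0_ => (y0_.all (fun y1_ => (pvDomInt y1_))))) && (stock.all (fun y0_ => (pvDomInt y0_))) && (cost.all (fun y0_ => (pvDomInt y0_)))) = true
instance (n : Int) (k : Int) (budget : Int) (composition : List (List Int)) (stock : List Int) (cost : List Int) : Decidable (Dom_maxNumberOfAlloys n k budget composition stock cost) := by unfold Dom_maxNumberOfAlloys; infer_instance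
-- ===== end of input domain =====

-- B restructures A's single global binary search (feasibility = any() over machines, early-exit
-- cost loop) into per-machine bitwise doubling/halving searches over the same cap, with a
-- full-pass prefix-flag cost check, folded with max; equal on Pre_ (the natural domain:
-- nonnegative composition·cost products and in-range indices).


-- midpoint bounds, needed for termination of A's binary-search loop
theorem pvMid_bounds {lo hi : Int} (h : lo < hi) :
    lo < PySem.Int.floordiv (lo + hi + 1) 2 ∧ PySem.Int.floordiv (lo + hi + 1) 2 ≤ hi := by
  rw [PySem.Int.floordiv_eq_ediv_of_pos (by norm_num)]
  omega

-- A's loop 'while lo < hi: mid = (lo+hi+1)//2; if any(...): lo = mid else: hi = mid-1'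
def pvBinSearch (f : Int → Bool) (lo hi : Int) : Int :=
  if h : lo < hi then
    if f (PySem.Int.floordiv (lo + hi + 1) 2) then
      pvBinSearch f (PySem.Int.floordiv (lo + hi + 1) 2) hi
    else
      pvBinSearch f lo (PySem.Int.floordiv (lo + hi + 1) 2 - 1)
  else lo
termination_by (hi - lo).toNat
decreasing_by
  · have := pvMid_bounds h; omega
  · have := pvMid_bounds h; omega

-- one term of the spend: max(0, row[j]*x - stock[j]) * cost[j]; getD is exact for the
-- in-range indices the capped fuel below guarantees
def pvTerm (row stock cost : List Int) (x : Int) (j : Nat) : Int :=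
  max 0 (row.getD j 0 * x - stock.getD j 0) * cost.getD j 0

-- A's inner loop 'total = 0; for j in range(n): total += <term>; if total > budget: return False'
-- — one step per j with the early exit, like Python's lazy range
def pvAfford (budget : Int) (row stock cost : List Int) (x : Int) : Nat → Nat → Int → Bool
  | 0, _, _ => true
  | fuel + 1, j, total =>
    if budget < total + pvTerm row stock cost x j then false
    else pvAfford budget row stock cost x fuel (j + 1) (total + pvTerm row stock cost x j)

-- can_make(x, machine): the fuel is n capped at the list lengths — at the first index beyond
-- them Python raises IndexError (such inputs are excluded by Pre_)
def pvCanMake (n : Int) (budget : Int) (row stock cost : List Int) (x : Int) : Bool :=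
  pvAfford budget row stock cost x
    (min n.toNat (min row.length (min stock.length cost.length))) 0 0

-- A's 'any(can_make(mid, i) for i in range(k))': short-circuiting scan, like Python's lazy
-- generator; fuel capped at len(composition) — beyond it Python raises (excluded by Pre_)
def pvAnyMachine (f : Nat → Bool) : Nat → Nat → Bool
  | 0, _ => false
  | fuel + 1, i => if f i then true else pvAnyMachine f fuel (i + 1)

-- ===== PORT A =====
def maxNumberOfAlloys (n : Int) (k : Int) (budget : Int) (composition : List (List Int)) (stock : List Int) (cost : List Int) : Int :=
  -- Pre_ gives stock ≠ [], so max(stock) is (PySem.List.max? stock (fun v => v)).getD 0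
  pvBinSearch
    (fun mid => pvAnyMachine
      (fun i => pvCanMake n budget (composition.getD i []) stock cost mid)
      (min k.toNat composition.length) 0)
    0 ((PySem.List.max? stock (fun v => v)).getD 0 + budget)

-- B's fits(row, x): full pass over range(n), running total plus an 'over' flag ('over = over or
-- t > budget'), no early return; indices in range on Pre_ (beyond them B's Python raises)
def pvFits (n budget : Int) (row stock cost : List Int) (x : Int) : Bool :=
  !((List.range n.toNat).foldl
      (fun (p : Int × Bool) j =>
        let t := p.1 + max 0 (row.getD j 0 * x - stock.getD j 0) * cost.getD j 0
        (t, p.2 || decide (budget < t)))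
      ((0 : Int), false)).2

-- B's 'step = 1; while step * 2 <= hi: step *= 2' (the guard 0 < step only makes the
-- recursion total; B's Python always starts it at step = 1)
def pvGrow (hi : Int) (step : Int) : Int :=
  if _h : 0 < step ∧ step * 2 ≤ hi then pvGrow hi (step * 2) else step
termination_by (hi - step).toNat
decreasing_by omega

-- B's 'x = 0; while step > 0: if x + step <= hi and fits(row, x + step): x += step; step //= 2'
def pvDescend (f : Int → Bool) (hi : Int) (x : Int) (step : Int) : Int :=
  if _h : 0 < step then
    pvDescend f hi
      (if x + step ≤ hi && f (x + step) then x + step else x)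
      (PySem.Int.floordiv step 2)
  else x
termination_by step.toNat
decreasing_by
  rw [PySem.Int.floordiv_eq_ediv_of_pos (by norm_num)]
  omega

-- ===== PORT B =====
def maxNumberOfAlloys_alt (n : Int) (k : Int) (budget : Int) (composition : List (List Int)) (stock : List Int) (cost : List Int) : Int :=
  let hi := (PySem.List.max? stock (fun v => v)).getD 0 + budget
  (List.range k.toNat).foldl
    (fun best i =>
      max best
        (pvDescend (fun x => pvFits n budget (composition.getD i []) stock cost x)
          hi 0 (pvGrow hi 1)))
    0

-- ===== PRECONDITION & SPEC =====
-- Pre_ is the problem's natural domain: whenever the search loops run (some machine exists and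
-- the range [0, max(stock)+budget] is nonempty) the indices used must be in range and each used
-- composition/cost product must be nonnegative (otherwise the spend is non-monotone in x and
-- each search's answer is an artefact of its probe order, so A's and B's values are equally
-- accidental); outside Pre_ A raises, or returns only because its early budget exit or the
-- short-circuiting any() happens before an out-of-range access that B performs.
def Pre_maxNumberOfAlloys (n : Int) (k : Int) (budget : Int) (composition : List (List Int)) (stock : List Int) (cost : List Int) : Prop :=
  stock ≠ [] ∧ k ≤ (composition.length : Int) ∧
  ((0 < k ∧ 0 < (PySem.List.max? stock (fun v => v)).getD 0 + budget) →
    n ≤ (stock.length : Int) ∧ n ≤ (cost.length : Int) ∧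
    ∀ row ∈ composition.take k.toNat, n ≤ (row.length : Int) ∧
      ∀ p ∈ (row.take n.toNat).zip (cost.take n.toNat), 0 ≤ p.1 * p.2)
instance (n : Int) (k : Int) (budget : Int) (composition : List (List Int)) (stock : List Int) (cost : List Int) : Decidable (Pre_maxNumberOfAlloys n k budget composition stock cost) := by unfold Pre_maxNumberOfAlloys; infer_instance

def pvWitness_maxNumberOfAlloys : Int × Int × Int × List (List Int) × List Int × List Int :=
  (2, 3, 15, [[1, 1], [1, 2], [1, 1]], [0, 0], [1, 2])

def Spec_maxNumberOfAlloys (n : Int) (k : Int) (budget : Int) (composition : List (List Int)) (stock : List Int) (cost : List Int) (out : Int) : Prop := out = maxNumberOfAlloys_alt n k budget composition stock cost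
instance (n : Int) (k : Int) (budget : Int) (composition : List (List Int)) (stock : List Int) (cost : List Int) (out : Int) : Decidable (Spec_maxNumberOfAlloys n k budget composition stock cost out) := by unfold Spec_maxNumberOfAlloys; infer_instance

-- ===== CLAIM (what is proved, stated in full; the proofs are below) =====
def Claim_equal_maxNumberOfAlloys : Prop := ∀ (n : Int) (k : Int) (budget : Int) (composition : List (List Int)) (stock : List Int) (cost : List Int), Dom_maxNumberOfAlloys n k budget composition stock cost → Pre_maxNumberOfAlloys n k budget composition stock cost → Spec_maxNumberOfAlloys n k budget composition stock cost (maxNumberOfAlloys n k budget composition stock cost)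


-- ===== LEMMAS AND PROOFS =====

-- one cost term max(0, c*x - s)*w is nondecreasing in x when 0 ≤ c*w
theorem pvTerm_mono (c s w x x' : Int) (hxx : x ≤ x') (hcw : 0 ≤ c * w) :
    max 0 (c * x - s) * w ≤ max 0 (c * x' - s) * w := by
  by_cases hc : 0 ≤ c <;> by_cases hw : 0 ≤ w
  · exact mul_le_mul_of_nonneg_right (max_le_max le_rfl (by nlinarith)) hw
  · have hw' : w < 0 := by omega
    have hc0 : c = 0 := by nlinarith
    simp [hc0]
  · have hc' : c < 0 := by omega
    have hw0 : w = 0 := by nlinarith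
    simp [hw0]
  · have hc' : c < 0 := by omega
    have hw' : w < 0 := by omega
    exact mul_le_mul_of_nonpos_right (max_le_max le_rfl (by nlinarith)) hw'.le

-- A's early-exit cost loop is antitone in x when every term it can reach is pointwise ≤ its
-- counterpart at the larger x
theorem pvAfford_mono (budget : Int) (row stock cost : List Int) (x x' : Int) (bound : Nat)
    (hterm : ∀ j < bound, pvTerm row stock cost x j ≤ pvTerm row stock cost x' j) :
    ∀ (fuel j : Nat), j + fuel ≤ bound → ∀ (total total' : Int), total ≤ total' →
      pvAfford budget row stock cost x' fuel j total' = true →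
      pvAfford budget row stock cost x fuel j total = true := by
  intro fuel
  induction fuel with
  | zero => intro j _ total total' _ _; simp [pvAfford]
  | succ fuel ih =>
    intro j hj total total' hle h
    have hterm_j := hterm j (by omega)
    rw [pvAfford] at h ⊢
    split at h
    · exact absurd h (by simp)
    · rename_i hnb
      rw [if_neg (by omega)]
      exact ih (j + 1) (by omega) _ _ (by omega) h

-- the short-circuiting any() scan succeeds iff some scanned index succeeds
theorem pvAnyMachine_iff (f : Nat → Bool) :
    ∀ (fuel i0 : Nat), pvAnyMachine f fuel i0 = true ↔ ∃ d, d < fuel ∧ f (i0 + d) = true := by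
  intro fuel
  induction fuel with
  | zero => intro i0; simp [pvAnyMachine]
  | succ fuel ih =>
    intro i0
    rw [pvAnyMachine]
    constructor
    · intro h
      split at h
      · exact ⟨0, by omega, by simpa using ‹f i0 = true›⟩
      · obtain ⟨d, hd, hf⟩ := (ih (i0 + 1)).mp h
        exact ⟨d + 1, by omega, by rw [show i0 + (d + 1) = i0 + 1 + d by omega]; exact hf⟩
    · rintro ⟨d, hd, hf⟩
      split
      · rfl
      · rename_i hf0
        apply (ih (i0 + 1)).mpr
        rcases Nat.eq_zero_or_pos d with h0 | h0
        · subst h0; simp at hf; simp [hf] at hf0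
        · exact ⟨d - 1, by omega, by rw [show i0 + 1 + (d - 1) = i0 + d by omega]; exact hf⟩

-- A's binary-search loop on an antitone predicate: result r satisfies lo ≤ r ≤ max lo hi,
-- r dominates every feasible point of (lo, hi], and is itself feasible when above lo
theorem pvBinSearch_spec (f : Int → Bool) (hmono : ∀ x y : Int, x ≤ y → f y = true → f x = true) :
    ∀ (N : Nat) (lo hi : Int), (hi - lo).toNat ≤ N →
      lo ≤ pvBinSearch f lo hi ∧ pvBinSearch f lo hi ≤ max lo hi ∧
      (∀ m, lo < m → m ≤ hi → f m = true → m ≤ pvBinSearch f lo hi) ∧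
      (lo < pvBinSearch f lo hi → f (pvBinSearch f lo hi) = true) := by
  intro N
  induction N with
  | zero =>
    intro lo hi hN
    have hle : ¬ lo < hi := by omega
    rw [pvBinSearch, dif_neg hle]
    exact ⟨le_refl _, le_max_left _ _, fun m hm hm' _ => by omega, fun h => absurd h (by omega)⟩
  | succ N ih =>
    intro lo hi hN
    by_cases hlt : lo < hi
    · have hmid := pvMid_bounds hlt
      rw [pvBinSearch, dif_pos hlt]
      split
      · rename_i hf
        obtain ⟨h1, h2, h3, h4⟩ := ih (PySem.Int.floordiv (lo + hi + 1) 2) hi (by omega)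
        refine ⟨by omega, by rw [max_eq_right (le_of_lt hlt)]; omega, ?_, fun _ => ?_⟩
        · intro m hm hm' hfm
          by_cases hc : PySem.Int.floordiv (lo + hi + 1) 2 < m
          · exact h3 m hc hm' hfm
          · omega
        · rcases lt_or_eq_of_le h1 with h | h
          · exact h4 h
          · rw [← h]; exact hf
      · rename_i hf
        obtain ⟨h1, h2, h3, h4⟩ := ih lo (PySem.Int.floordiv (lo + hi + 1) 2 - 1) (by omega)
        refine ⟨h1, by rw [max_eq_right (le_of_lt hlt)]; omega, ?_, h4⟩
        intro m hm hm' hfm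
        have hmlt : m ≤ PySem.Int.floordiv (lo + hi + 1) 2 - 1 := by
          by_contra hc
          exact hf (hmono _ m (by omega) hfm)
        exact h3 m hm hmlt hfm
    · rw [pvBinSearch, dif_neg hlt]
      exact ⟨le_refl _, le_max_left _ _, fun m hm hm' _ => by omega, fun h => absurd h (by omega)⟩

-- once B's 'over' flag is set it stays set
theorem pvFlag_stays (budget : Int) (row stock cost : List Int) (x : Int) :
    ∀ (l : List Nat) (t : Int),
      ((l.foldl
        (fun (p : Int × Bool) j =>
          let s := p.1 + max 0 (row.getD j 0 * x - stock.getD j 0) * cost.getD j 0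
          (s, p.2 || decide (budget < s))) (t, true)).2) = true := by
  intro l
  induction l with
  | nil => intro t; simp
  | cons j l ih => intro t; simpa using ih _

-- A's early-exit loop over range(j, j+fuel) returns true iff B's full-pass flag stays false
theorem pvAfford_eq_flag (budget : Int) (row stock cost : List Int) (x : Int) :
    ∀ (fuel j : Nat) (t : Int),
      pvAfford budget row stock cost x fuel j t =
      !(((List.range' j fuel).foldl
        (fun (p : Int × Bool) j =>
          let s := p.1 + max 0 (row.getD j 0 * x - stock.getD j 0) * cost.getD j 0
          (s, p.2 || decide (budget < s))) (t, false)).2) := by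
  intro fuel
  induction fuel with
  | zero => intro j t; simp [pvAfford]
  | succ fuel ih =>
    intro j t
    rw [pvAfford, List.range'_succ, List.foldl_cons]
    by_cases hb : budget < t + pvTerm row stock cost x j
    · rw [if_pos hb]
      have : (decide (budget < t + max 0 (row.getD j 0 * x - stock.getD j 0) * cost.getD j 0)) = true := by
        simp only [decide_eq_true_eq]; simpa [pvTerm] using hb
      simp only [this, Bool.false_or]
      rw [pvFlag_stays]
      rfl
    · rw [if_neg hb]
      have : (decide (budget < t + max 0 (row.getD j 0 * x - stock.getD j 0) * cost.getD j 0)) = false := by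
        simp only [decide_eq_false_iff_not]; simpa [pvTerm] using hb
      simp only [this, Bool.false_or]
      simpa [pvTerm] using ih (j + 1) (t + pvTerm row stock cost x j)

-- with the caps equal to n.toNat, A's can_make and B's fits coincide
theorem pvCanMake_eq_fits (n budget : Int) (row stock cost : List Int) (x : Int)
    (hcap : min n.toNat (min row.length (min stock.length cost.length)) = n.toNat) :
    pvCanMake n budget row stock cost x = pvFits n budget row stock cost x := by
  unfold pvCanMake pvFits
  rw [hcap, List.range_eq_range']
  exact pvAfford_eq_flag budget row stock cost x n.toNat 0 0

-- B's doubling loop: from a positive power of two it returns a power of two s with hi < 2*s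
theorem pvGrow_spec (hi : Int) :
    ∀ (N : Nat) (step : Int), (hi - step).toNat ≤ N → 0 < step → (∃ e : Nat, step = 2 ^ e) →
      (∃ e : Nat, pvGrow hi step = 2 ^ e) ∧ hi < pvGrow hi step * 2 ∧ 0 < pvGrow hi step := by
  intro N
  induction N with
  | zero =>
    intro step hN hpos he
    rw [pvGrow, dif_neg (by omega)]
    exact ⟨he, by omega, hpos⟩
  | succ N ih =>
    intro step hN hpos he
    by_cases hc : step * 2 ≤ hi
    · rw [pvGrow, dif_pos ⟨hpos, hc⟩]
      obtain ⟨e, hee⟩ := he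
      exact ih (step * 2) (by omega) (by omega) ⟨e + 1, by rw [pow_succ]; omega⟩
    · rw [pvGrow, dif_neg (by omega)]
      exact ⟨he, by omega, hpos⟩

-- B's halving loop on a downward-closed predicate, with step a power of two: result r ≥ x,
-- r ≤ max x hi, r is feasible when above x, and dominates every feasible point of the window
theorem pvDescend_spec (f : Int → Bool) (hi : Int)
    (hmono : ∀ a b : Int, a ≤ b → f b = true → f a = true) :
    ∀ (e : Nat) (x : Int),
      x ≤ pvDescend f hi x (2 ^ e) ∧
      pvDescend f hi x (2 ^ e) ≤ max x hi ∧
      (x < pvDescend f hi x (2 ^ e) →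
        pvDescend f hi x (2 ^ e) ≤ hi ∧ f (pvDescend f hi x (2 ^ e)) = true) ∧
      (∀ m, x < m → m ≤ hi → m < x + 2 * 2 ^ e → f m = true →
        m ≤ pvDescend f hi x (2 ^ e)) := by
  intro e
  induction e with
  | zero =>
    intro x
    rw [pvDescend, dif_pos (by norm_num : (0:Int) < 2 ^ 0)]
    have h0 : PySem.Int.floordiv ((2 : Int) ^ 0) 2 = 0 := by
      rw [PySem.Int.floordiv_eq_ediv_of_pos (by norm_num)]; decide
    rw [h0, pvDescend, dif_neg (by omega), pow_zero]
    by_cases hc : x + 1 ≤ hi ∧ f (x + 1) = true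
    · rw [if_pos (by simp [hc.1, hc.2])]
      exact ⟨by omega, le_trans hc.1 (le_max_right x hi), fun _ => ⟨hc.1, hc.2⟩,
        fun m hm hm' hm2 _ => by omega⟩
    · rw [if_neg (by simpa using fun h1 h2 => hc ⟨h1, h2⟩)]
      refine ⟨le_refl x, le_max_left _ _, fun h => absurd h (by omega), ?_⟩
      intro m hm hm' hm2 hf
      have hmx : m = x + 1 := by omega
      exact absurd ⟨by omega, hmx ▸ hf⟩ hc
  | succ e ih =>
    intro x
    have hs : (0 : Int) < 2 ^ e := by positivity
    have hstep : (2 : Int) ^ (e + 1) = 2 * 2 ^ e := by ring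
    have hhalf : PySem.Int.floordiv ((2 : Int) ^ (e + 1)) 2 = 2 ^ e := by
      rw [PySem.Int.floordiv_eq_ediv_of_pos (by norm_num), pow_succ,
        Int.mul_ediv_cancel _ (by norm_num)]
    rw [pvDescend, dif_pos (by positivity), hhalf]
    by_cases hc : x + 2 ^ (e + 1) ≤ hi ∧ f (x + 2 ^ (e + 1)) = true
    · rw [if_pos (by simp [hc.1, hc.2])]
      obtain ⟨ia, ib, ic, id⟩ := ih (x + 2 ^ (e + 1))
      refine ⟨by omega, by omega, ?_, ?_⟩
      · intro _
        rcases lt_or_eq_of_le ia with h | h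
        · exact ic h
        · exact ⟨by omega, by rw [← h]; exact hc.2⟩
      · intro m hm hm' hwin hf
        by_cases hmx : m ≤ x + 2 ^ (e + 1)
        · omega
        · exact id m (by omega) hm' (by omega) hf
    · rw [if_neg (by simpa using fun h1 => fun h2 => hc ⟨h1, h2⟩)]
      obtain ⟨ia, ib, ic, id⟩ := ih x
      refine ⟨ia, ib, ic, ?_⟩
      intro m hm hm' hwin hf
      have hmwin : m < x + 2 * 2 ^ e := by
        by_contra hge
        exact hc ⟨by omega, hmono _ m (by omega) hf⟩
      exact id m hm hm' hmwin hf

-- with an empty range (hi ≤ 0) the halving loop never moves from x = 0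
theorem pvDescend_stuck (f : Int → Bool) (hi : Int) (hhi : hi ≤ 0) :
    ∀ (N : Nat) (step : Int), step.toNat ≤ N → pvDescend f hi 0 step = 0 := by
  intro N
  induction N with
  | zero => intro step hN; rw [pvDescend, dif_neg (by omega)]
  | succ N ih =>
    intro step hN
    by_cases hp : 0 < step
    · rw [pvDescend, dif_pos hp,
        if_neg (by simp only [Bool.and_eq_true, decide_eq_true_eq]
                   exact fun h => absurd h.1 (by omega))]
      have hfd : PySem.Int.floordiv step 2 = step / 2 :=
        PySem.Int.floordiv_eq_ediv_of_pos (by norm_num)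
      rw [hfd]
      exact ih _ (by omega)
    · rw [pvDescend, dif_neg hp]

-- B's running-best fold: bounds of (List.range k').foldl (fun b i => max b (g i)) a
theorem pvFoldMax_ge_init (g : Nat → Int) :
    ∀ (l : List Nat) (a : Int), a ≤ l.foldl (fun b i => max b (g i)) a := by
  intro l
  induction l with
  | nil => intro a; simp
  | cons i l ih => intro a; exact le_trans (le_max_left a (g i)) (ih _)

theorem pvFoldMax_ge_elem (g : Nat → Int) :
    ∀ (l : List Nat) (a : Int) (i : Nat), i ∈ l → g i ≤ l.foldl (fun b i => max b (g i)) a := by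
  intro l
  induction l with
  | nil => intro a i h; simp at h
  | cons j l ih =>
    intro a i h
    rcases List.mem_cons.mp h with h | h
    · subst h
      exact le_trans (le_max_right a (g i)) (pvFoldMax_ge_init g l _)
    · exact ih _ i h

theorem pvFoldMax_le (g : Nat → Int) (R : Int) :
    ∀ (l : List Nat) (a : Int), a ≤ R → (∀ i ∈ l, g i ≤ R) →
      l.foldl (fun b i => max b (g i)) a ≤ R := by
  intro l
  induction l with
  | nil => intro a ha _; simpa using ha
  | cons j l ih =>
    intro a ha hall
    exact ih _ (max_le ha (hall j (by simp))) (fun i hi => hall i (by simp [hi]))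

-- ===== VERDICT (by name: the statement is the Claim_ definition above) =====
theorem maxNumberOfAlloys_spec : Claim_equal_maxNumberOfAlloys := by
  intro n k budget composition stock cost _ hpre
  obtain ⟨hst, hk, hmain⟩ := hpre
  unfold Spec_maxNumberOfAlloys maxNumberOfAlloys maxNumberOfAlloys_alt
  set hi := (PySem.List.max? stock (fun v => v)).getD 0 + budget with hhi
  set F : Nat → Int → Bool := fun i mid =>
    pvCanMake n budget (composition.getD i []) stock cost mid with hF
  by_cases hk0 : 0 < k
  case neg =>
    -- k ≤ 0: A's any() scans nothing, its search returns 0; B folds over range 0 = []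
    have hkz : k.toNat = 0 := by omega
    rw [hkz]
    simp only [Nat.min_eq_left (Nat.zero_le _), List.range_zero, List.foldl_nil]
    obtain ⟨h1, _, _, h4⟩ := pvBinSearch_spec (fun mid => pvAnyMachine (fun i => F i mid) 0 0)
      (fun x y _ h => by simp [pvAnyMachine] at h) (hi - 0).toNat 0 hi (le_refl _)
    by_contra hne
    have hpos : 0 < pvBinSearch (fun mid => pvAnyMachine (fun i => F i mid) 0 0) 0 hi := by
      rcases lt_or_eq_of_le h1 with h | h
      · exact h
      · exact absurd h.symm (by simpa [hF] using hne)
    simpa [pvAnyMachine] using h4 hpos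
  case pos =>
  by_cases hhi0 : 0 < hi
  case neg =>
    -- empty search range: A's loop exits at once with lo = 0; B's per-machine descend makes no
    -- move (x + step ≤ hi always fails), so every machine contributes 0
    have hA : pvBinSearch (fun mid => pvAnyMachine
        (fun i => pvCanMake n budget (composition.getD i []) stock cost mid)
        (min k.toNat composition.length) 0) 0 hi = 0 := by
      rw [pvBinSearch, dif_neg (by omega)]
    rw [hA]
    have hzero : ∀ i : Nat,
        pvDescend (fun x => pvFits n budget (composition.getD i []) stock cost x)
          hi 0 (pvGrow hi 1) = 0 := fun i =>
      pvDescend_stuck _ hi (by omega) (pvGrow hi 1).toNat _ (le_refl _)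
    symm
    apply le_antisymm
    · exact pvFoldMax_le _ 0 _ 0 (le_refl 0) (fun i _ => le_of_eq (hzero i))
    · exact pvFoldMax_ge_init _ _ _
  case pos =>
  obtain ⟨hsn, hcn, hrows⟩ := hmain ⟨hk0, hhi0⟩
  have hterm : ∀ i, i < k.toNat → ∀ x x' : Int, x ≤ x' →
      ∀ j < n.toNat, pvTerm (composition.getD i []) stock cost x j
        ≤ pvTerm (composition.getD i []) stock cost x' j := by
    intro i hik' x x' hxx j hjn
    have hic : i < composition.length := by omega
    have hrowmem : composition.getD i [] ∈ composition.take k.toNat := by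
      rw [List.getD_eq_getElem _ _ hic]
      have hi' : i < (composition.take k.toNat).length := by
        simp only [List.length_take]; omega
      have := List.getElem_take (xs := composition) (i := i) (j := k.toNat) (h := hi')
      exact this ▸ List.getElem_mem hi'
    obtain ⟨hrlen, hpair⟩ := hrows _ hrowmem
    have hjr : j < (composition.getD i []).length := by omega
    have hjc : j < cost.length := by omega
    have hzlen : j < (((composition.getD i []).take n.toNat).zip (cost.take n.toNat)).length := by
      simp only [List.length_zip, List.length_take]; omega
    have hz := hpair _ (List.getElem_mem hzlen)
    rw [List.getElem_zip] at hz
    simp only [List.getElem_take] at hz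
    unfold pvTerm
    rw [List.getD_eq_getElem _ _ hjr, List.getD_eq_getElem _ _ hjc]
    exact pvTerm_mono _ _ _ _ _ hxx hz
  have hFmono : ∀ i, i < k.toNat → ∀ x y : Int, x ≤ y → F i y = true → F i x = true := by
    intro i hik x y hxy hfy
    rw [hF] at hfy ⊢
    unfold pvCanMake at hfy ⊢
    refine pvAfford_mono budget _ stock cost x y n.toNat
      (hterm i hik x y hxy) _ 0 (by omega) 0 0 (le_refl 0) hfy
  -- the caps in can_make equal n.toNat for every machine B touches
  have hcap : ∀ i, i < k.toNat →
      min n.toNat (min (composition.getD i []).length (min stock.length cost.length))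
        = n.toNat := by
    intro i hik
    have hic : i < composition.length := by omega
    have hrowmem : composition.getD i [] ∈ composition.take k.toNat := by
      rw [List.getD_eq_getElem _ _ hic]
      have hi' : i < (composition.take k.toNat).length := by
        simp only [List.length_take]; omega
      have := List.getElem_take (xs := composition) (i := i) (j := k.toNat) (h := hi')
      exact this ▸ List.getElem_mem hi'
    obtain ⟨hrlen, _⟩ := hrows _ hrowmem
    omega
  -- B's fits agrees with A's can_make on every machine B touches
  have hfits : ∀ i, i < k.toNat → ∀ x : Int,
      pvFits n budget (composition.getD i []) stock cost x = F i x := by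
    intro i hik x
    exact (pvCanMake_eq_fits n budget _ stock cost x (hcap i hik)).symm
  set fuelK := min k.toNat composition.length with hfuelK
  have hfk : fuelK = k.toNat := by omega
  set G : Int → Bool := fun mid => pvAnyMachine (fun i => F i mid) fuelK 0 with hG
  have hGmono : ∀ x y : Int, x ≤ y → G y = true → G x = true := by
    intro x y hxy hgy
    rw [hG] at hgy ⊢
    obtain ⟨d, hd, hf⟩ := (pvAnyMachine_iff _ fuelK 0).mp hgy
    exact (pvAnyMachine_iff _ fuelK 0).mpr
      ⟨d, hd, hFmono _ (by omega) x y hxy hf⟩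
  obtain ⟨hR0, hRmax, hRdom, hRfeas⟩ :=
    pvBinSearch_spec G hGmono (hi - 0).toNat 0 hi (le_refl _)
  set R := pvBinSearch G 0 hi with hRdef
  -- the growth loop's output: a power of two s with hi < 2*s
  obtain ⟨⟨e, hee⟩, hlt2, hspos⟩ :=
    pvGrow_spec hi (hi - 1).toNat 1 (le_refl _) (by norm_num) ⟨0, by norm_num⟩
  -- per-machine triple for B's descend, i < k.toNat
  have hri : ∀ i, i < k.toNat →
      0 ≤ pvDescend (fun x => pvFits n budget (composition.getD i []) stock cost x)
            hi 0 (pvGrow hi 1) ∧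
      pvDescend (fun x => pvFits n budget (composition.getD i []) stock cost x)
            hi 0 (pvGrow hi 1) ≤ hi ∧
      (0 < pvDescend (fun x => pvFits n budget (composition.getD i []) stock cost x)
            hi 0 (pvGrow hi 1) →
        F i (pvDescend (fun x => pvFits n budget (composition.getD i []) stock cost x)
            hi 0 (pvGrow hi 1)) = true) ∧
      (∀ m, 0 < m → m ≤ hi → F i m = true →
        m ≤ pvDescend (fun x => pvFits n budget (composition.getD i []) stock cost x)
            hi 0 (pvGrow hi 1)) := by
    intro i hik
    have hfe : (fun x => pvFits n budget (composition.getD i []) stock cost x) = F i := by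
      funext x; exact hfits i hik x
    rw [hfe, hee]
    obtain ⟨ha, hb, hc, hd⟩ := pvDescend_spec (F i) hi (hFmono i hik) e 0
    refine ⟨ha, ?_, fun h => (hc h).2, fun m hm hm' hf => hd m hm hm' (by omega) hf⟩
    calc pvDescend (F i) hi 0 (2 ^ e) ≤ max 0 hi := hb
      _ = hi := max_eq_right hhi0.le
  apply le_antisymm
  · -- R ≤ best fold
    rcases eq_or_lt_of_le hR0 with h | h
    · rw [← h]; exact pvFoldMax_ge_init _ _ _
    · obtain ⟨d, hd, hf⟩ := (pvAnyMachine_iff _ fuelK 0).mp (hRfeas h)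
      have hRhi : R ≤ hi := by
        have := hRmax
        rw [max_eq_right hhi0.le] at this
        exact this
      have hdk : d < k.toNat := by omega
      have := (hri d hdk).2.2.2 R h hRhi (by simpa using hf)
      exact le_trans this (pvFoldMax_ge_elem _ (List.range k.toNat) 0 d (List.mem_range.mpr hdk))
  · -- best fold ≤ R
    apply pvFoldMax_le _ _ _ _ hR0
    intro d hdmem
    have hdk : d < k.toNat := List.mem_range.mp hdmem
    obtain ⟨h1, h2, h3, h4⟩ := hri d hdk
    rcases eq_or_lt_of_le h1 with h | h
    · exact h ▸ hR0
    · apply hRdom _ h h2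
      exact (pvAnyMachine_iff _ fuelK 0).mpr ⟨d, by omega, by simpa using h3 h⟩
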